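-- pv_equiv track=rewrite | github.com/pypi-data/pypi-mirror-22 | packages/pyphs/pyphs-0.1.9.8.tar.gz/pyphs-0.1.9.8/pyphs/misc/tools.py | decimate
-- ===== SOURCE A (Python) =====
-- def decimate(it, nd=10):
--     """
--     Return first then each 'nd' elements from iterable 'it'.
--
--     Parameters
--     -----------
--
--     it : iterable
--         Input data.
--
--     nd : int
--         Decimation factor
--
--     Returns
--     -------
--
--     l : list
--         One in 'nd' values from 'it'.
--
--     """
--     assert isinstance(nd, int), "'nd' is not an integer: {0!r}".format(nd)
--     assert nd > 0, "'nd' is not a positive integer: {0!r}".format(nd)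
--     l = list()
--     n = 0
--     for el in it:
--         if not n % nd:
--             l.append(el)
--         n += 1
--     return l
-- ===== SOURCE B (Python) =====
-- def decimate(it, nd=10):
--     assert isinstance(nd, int), "'nd' is not an integer: {0!r}".format(nd)
--     assert nd > 0, "'nd' is not a positive integer: {0!r}".format(nd)
--     l = list(it)
--     out = []
--     while l:
--         out.append(l[0])
--         l = l[nd:]
--     return out
-- ===== Notes on version B (the rewrite author's own statement) =====
-- stated objective: alternative
-- what changed: Replaces A's counter-and-modulo filtering loop by repeated chunking: take the head, then slice off the first nd elements (l = l[nd:]) until the list is empty; no counter or modulo test remains.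
import Mathlib
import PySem

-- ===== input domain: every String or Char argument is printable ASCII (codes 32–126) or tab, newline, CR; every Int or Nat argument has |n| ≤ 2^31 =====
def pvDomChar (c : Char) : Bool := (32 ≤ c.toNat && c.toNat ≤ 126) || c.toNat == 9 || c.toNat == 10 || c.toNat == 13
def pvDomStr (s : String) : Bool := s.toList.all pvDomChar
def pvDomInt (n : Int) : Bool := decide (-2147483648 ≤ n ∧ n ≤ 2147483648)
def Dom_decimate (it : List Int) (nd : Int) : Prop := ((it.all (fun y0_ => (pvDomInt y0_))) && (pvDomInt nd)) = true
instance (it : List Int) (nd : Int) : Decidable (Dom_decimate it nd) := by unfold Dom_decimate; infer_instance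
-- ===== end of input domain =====

-- B replaces A's counter-and-modulo loop by repeated head-take-and-stride-slice chunking (alternative decomposition, same cost).
-- ===== PORT A =====
-- loop 'for el in it: if not n % nd: l.append(el); n += 1' as a fold over (l, n)
def decimate (it : List Int) (nd : Int) : List Int :=
  (it.foldl (fun (st : List Int × Int) el =>
      (if PySem.Int.mod st.2 nd = 0 then st.1 ++ [el] else st.1, st.2 + 1))
    ([], 0)).1

-- ===== PORT B =====
-- 'while l: out.append(l[0]); l = l[nd:]' ; the 1 ≤ nd guard only makes the recursion total (B's assert raises otherwise)
def decimateChunk (nd : Int) (h : 1 ≤ nd) : List Int → List Int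
  | [] => []
  | x :: xs => x :: decimateChunk nd h (PySem.List.slice (x :: xs) (some nd) none)
termination_by l => l.length
decreasing_by
  rw [PySem.List.slice_from _ (by omega)]
  simp only [List.length_drop, List.length_cons]
  omega

def decimate_alt (it : List Int) (nd : Int) : List Int :=
  if h : 1 ≤ nd then decimateChunk nd h it else []

-- ===== PRECONDITION & SPEC =====
-- A's asserts raise AssertionError unless nd > 0
def Pre_decimate (it : List Int) (nd : Int) : Prop := 1 ≤ nd
instance (it : List Int) (nd : Int) : Decidable (Pre_decimate it nd) := by unfold Pre_decimate; infer_instance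
def pvWitness_decimate : List Int × Int := ([1, 2, 3, 4, 5], 2)
def Spec_decimate (it : List Int) (nd : Int) (out : List Int) : Prop := out = decimate_alt it nd
instance (it : List Int) (nd : Int) (out : List Int) : Decidable (Spec_decimate it nd out) := by unfold Spec_decimate; infer_instance

-- ===== CLAIM (what is proved, stated in full; the proofs are below) =====
def Claim_equal_decimate : Prop := ∀ (it : List Int) (nd : Int), Dom_decimate it nd → Pre_decimate it nd → Spec_decimate it nd (decimate it nd)

-- ===== LEMMAS AND PROOFS =====

-- proof-side characterisation of A's loop: elements kept at counters divisible by nd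
def keep (nd : Int) : List Int → Int → List Int
  | [], _ => []
  | x :: xs, c => (if PySem.Int.mod c nd = 0 then [x] else []) ++ keep nd xs (c + 1)

theorem foldl_eq_keep (nd : Int) (xs : List Int) (acc : List Int) (c : Int) :
    (xs.foldl (fun (st : List Int × Int) el =>
        (if PySem.Int.mod st.2 nd = 0 then st.1 ++ [el] else st.1, st.2 + 1))
      (acc, c)).1 = acc ++ keep nd xs c := by
  induction xs generalizing acc c with
  | nil => simp [keep]
  | cons x xs ih =>
    simp only [List.foldl_cons, keep]
    split_ifs with h <;> simp [ih, h]

theorem keep_congr (nd : Int) (hnd : 1 ≤ nd) (xs : List Int) (c c' : Int)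
    (h : c % nd = c' % nd) : keep nd xs c = keep nd xs c' := by
  induction xs generalizing c c' with
  | nil => rfl
  | cons x xs ih =>
    simp only [keep, PySem.Int.mod_eq_emod_of_pos (by omega : (0:Int) < nd), h]
    rw [ih (c + 1) (c' + 1) (by rw [Int.add_emod, h, ← Int.add_emod])]

theorem keep_shift (nd : Int) (hnd : 1 ≤ nd) (r : Nat) (xs : List Int)
    (hr : (r : Int) < nd) : keep nd xs (nd - r) = keep nd (xs.drop r) 0 := by
  induction xs generalizing r with
  | nil => simp [keep]
  | cons x xs ih =>
    cases r with
    | zero =>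
      simp only [Nat.cast_zero, sub_zero, List.drop_zero, keep,
        PySem.Int.mod_eq_emod_of_pos (by omega : (0:Int) < nd),
        Int.emod_self, Int.zero_emod, if_pos rfl]
      have hm : (nd + 1) % nd = (0 + 1) % nd := by
        have h2 := Int.add_mul_emod_self_left (a := (1:Int)) (b := nd) (c := 1)
        simpa [add_comm] using h2
      rw [keep_congr nd hnd xs (nd + 1) (0 + 1) hm]
    | succ s =>
      push_cast at hr
      simp only [keep, PySem.Int.mod_eq_emod_of_pos (by omega : (0:Int) < nd)]
      push_cast
      rw [Int.emod_eq_of_lt (by omega) (by omega), if_neg (by omega)]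
      have he : nd - ((s:Int) + 1) + 1 = nd - (s : Nat) := by push_cast; ring
      rw [he, ih s (by omega), List.drop_succ_cons]
      simp

theorem keep_eq_chunk (nd : Int) (h : 1 ≤ nd) :
    ∀ (n : Nat) (xs : List Int), xs.length ≤ n → keep nd xs 0 = decimateChunk nd h xs := by
  intro n
  induction n with
  | zero =>
    intro xs hx
    have : xs = [] := List.eq_nil_of_length_eq_zero (by omega)
    subst this; simp [keep, decimateChunk]
  | succ n ih =>
    intro xs hx
    cases xs with
    | nil => simp [keep, decimateChunk]
    | cons x xs =>
      rw [decimateChunk, PySem.List.slice_from _ (by omega : (0:Int) ≤ nd)]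
      simp only [keep, PySem.Int.mod_eq_emod_of_pos (by omega : (0:Int) < nd),
        Int.zero_emod, if_true, zero_add, List.singleton_append, List.cons.injEq, true_and]
      have h1 : (1:Int) = nd - ((nd - 1).toNat : Nat) := by push_cast; omega
      rw [h1, keep_shift nd h (nd - 1).toNat xs (by push_cast; omega)]
      rw [ih _ (by simp only [List.length_drop]; simp at hx; omega)]
      have hd : List.drop nd.toNat (x :: xs) = List.drop (nd - 1).toNat xs := by
        have h2 : nd.toNat = (nd - 1).toNat + 1 := by omega
        rw [h2, List.drop_succ_cons]
      rw [hd]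

-- ===== VERDICT (by name: the statement is the Claim_ definition above) =====
theorem decimate_spec : Claim_equal_decimate := by
  intro it nd _ hpre
  unfold Pre_decimate at hpre
  unfold Spec_decimate decimate decimate_alt
  rw [dif_pos hpre, foldl_eq_keep, List.nil_append,
    keep_eq_chunk nd hpre it.length it le_rfl]
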